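/-
  INTERFACE CHECK S9 ↔ S6 (compile-only): the frame boundary of Vorbis/Spec/Top.lean and the decode-time invariant of
  vorbis_decode_packet_rest (Vorbis/Spec/PacketRest.lean) are ONE definition, `Vorbis.Spec.DecodeInv` (Vorbis/Spec/DecodeInv.lean): what
  vorbis_decode_packet must supply at the call is literally the invariant of its own precondition (carried over its prologue and
  vorbis_decode_initial by `DecodeInv.carry` / the callee's post), and what it gets back is literally its postcondition's clause.
  (S9's `Top.DecodePt` and S6's `vorbis_decode_packet_rest.Inv` were two structures, each proved equal to an earlier edition of the
  other by `decodePt_of_inv` / `inv_of_decodePt`; both lemmas are now the identity and are kept under their names as such.)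
-/
import Vorbis.Spec.Top
import Vorbis.Spec.PacketRest
namespace Vorbis.Spec.TopIface
open X86 X86.User Asan Vorbis.Spec.Top Vorbis.Spec.vorbis_decode_packet_rest

variable {others : List Obj} {frames : List (Nat × FrameLayout)} {len : Nat} {A : Arena} {stored room : Int}
  {ysz : Nat → Nat} {mem : Mem} {f : Nat}

/-- **From the callee's invariant back to the caller's frame boundary** (vorbis_decode_packet_rest's post ⇒ vorbis_decode_packet's
post): the same proposition. -/
theorem decodePt_of_inv (h : DecodeInv others frames len A stored room ysz mem f) :
    DecodeInv others frames len A stored room ysz mem f :=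
  h

/-- **From the caller's frame boundary to the callee's invariant** (vorbis_decode_packet's state at the call ⇒
vorbis_decode_packet_rest's pre): the same proposition, for the SAME ghost sizes `ysz` of the `finalY` blocks. -/
theorem inv_of_decodePt (h : DecodeInv others frames len A stored room ysz mem f) :
    DecodeInv others frames len A stored room ysz mem f :=
  h

/-- **vorbis_decode_packet_rest's precondition at its call site in vorbis_decode_packet**: the shadow clause of the state at the
callee's entry, the invariant (for the frame list with vorbis_decode_packet's own frame in front), and the arguments. (That the
caller HAS `Args` — in particular the clauses `len_above` / `left_above` of freeze-7: `len`, `p_left` lie above the two stack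
arguments — is Vorbis/Spec/PacketRestArgsTest.lean: `above_of_caller` and the `example` after it.) -/
example (s : State) (mode : Nat) (hsh : ShadowPre others frames s)
    (h : DecodeInv others frames len A stored room ysz s.mem (s.reg .rdi).toNat) (hargs : Args others frames mode s) :
    (vorbis_decode_packet_rest.spec others frames len A stored room mode ysz).pre s :=
  ⟨hsh, h, hargs⟩

/-- **How stb_vorbis_open_memory establishes the invariant** for the arena copy `f'` (after `Real.P5.of_move`): the point P5 is a
frame boundary; SEP by `Separated.transfer`; the hand-over carrier is start_decoder's (its post exports `HandOK` for the exit
arena; `Hand.mono` over vorbis_alloc), with `*f'` an arena block; the sizes `ysz` exist by FY1; `hcfg` ("every block the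
configuration reads is an arena block") is `StartDecoder.Done.reads_arena` of start_decoder's post, taken over vorbis_alloc and the
copy by `readsArena_extends` / `readsArena_move` (Vorbis/Spec/DecodeInv.lean; the chain: Vorbis/Spec/OpenMemoryReadsTest.lean). -/
example {p : Nat} (h5 : Real.P5 len (A, others) (RunBlk A len) (LiveSet others frames) mem f)
    (hsep : Separated (RunBlk A len) mem f) (hhand : Hand others frames len A p)
    (hbuf : ∀ C, SampleBuf (RunBlk A len) mem f C → C.size = 0 ∨ A.Blk C) (hc : Consts mem)
    (hcfg : ∀ B, ConfigOK.Reads mem f B → A.Blk B) :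
    ∃ ysz : Nat → Nat, DecodeInv others frames len A 0 0 ysz mem f := by
  have hfb := Real.P5.fb h5
  obtain ⟨ysz, hy⟩ := DecodeInv.exists_ysz (Real.VorbisOK.config hfb.vorbis).finalY
  exact ⟨ysz, hfb, hsep, DecodeInv.hand_of_arenaBlk hhand hfb.ado.ok h5.self, h5.self, hbuf, hc, hy, hcfg⟩

end Vorbis.Spec.TopIface
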